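-- pv_equiv track=rewrite | github.com/wtsi-hgi/sc_analysis | scripts/qc_tf_barcodes.py | build_barcode_lookup
-- ===== SOURCE A (Python) =====
-- def build_barcode_lookup(barcode_dict, max_mismatch, alphabet = "ACGT"):
--     """
--     Build a fast lookup table for cell barcodes allowing up to `max_mismatch` mismatches.
--     Parameters:
--         -- barcode_dict: Dictionary where keys are valid barcode sequences (strings)
--         -- max_mismatch: Number of mismatches to tolerate
--         -- alphabet: Alphabet used for barcodes (default = "ACGT").
--     Returns:
--     -------
--         -- dict: Lookup dictionary mapping any possible mutated barcode sequence
--     """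
--     lookup = {}
--     for cb in barcode_dict:
--         lookup[cb] = cb
--
--         if max_mismatch >= 1:
--             for i in range(len(cb)):
--                 original_base = cb[i]
--                 for base in alphabet:
--                     if base == original_base:
--                         continue
--                     mutated = cb[:i] + base + cb[i+1:]
--                     lookup.setdefault(mutated, cb)
--
--     return lookup
-- ===== SOURCE B (Python) =====
-- def _variants(prefix, suffix, alphabet):
--     # all 1-mismatch variants of prefix+suffix that mutate a position inside suffix,
--     # generated by walking the string once (position order, alphabet order)
--     if not suffix:
--         return []
--     orig, rest = suffix[0], suffix[1:]
--     here = [prefix + base + rest for base in alphabet if base != orig]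
--     return here + _variants(prefix + orig, rest, alphabet)
--
--
-- def build_barcode_lookup(barcode_dict, max_mismatch, alphabet="ACGT"):
--     barcodes = list(dict.fromkeys(barcode_dict))
--     exact = set(barcodes)
--     seen = set()
--     out = []
--     for cb in barcodes:
--         events = [(cb, cb)]
--         if max_mismatch >= 1:
--             events += [(m, m if m in exact else cb) for m in _variants("", cb, alphabet)]
--         for key, val in events:
--             if key not in seen:
--                 seen.add(key)
--                 out.append((key, val))
--     return dict(out)
-- ===== Notes on version B (the rewrite author's own statement) =====
-- stated objective: alternative
-- what changed: B replaces A's dict-with-overwrite by a seen-set plus an append-only output list, resolves the exact-match-wins rule eagerly against a precomputed set of barcodes instead of by later dict overwrite, and generates the 1-mismatch variants by a single recursive prefix/suffix walk of the barcode instead of index-and-slice loops.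
import Mathlib
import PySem

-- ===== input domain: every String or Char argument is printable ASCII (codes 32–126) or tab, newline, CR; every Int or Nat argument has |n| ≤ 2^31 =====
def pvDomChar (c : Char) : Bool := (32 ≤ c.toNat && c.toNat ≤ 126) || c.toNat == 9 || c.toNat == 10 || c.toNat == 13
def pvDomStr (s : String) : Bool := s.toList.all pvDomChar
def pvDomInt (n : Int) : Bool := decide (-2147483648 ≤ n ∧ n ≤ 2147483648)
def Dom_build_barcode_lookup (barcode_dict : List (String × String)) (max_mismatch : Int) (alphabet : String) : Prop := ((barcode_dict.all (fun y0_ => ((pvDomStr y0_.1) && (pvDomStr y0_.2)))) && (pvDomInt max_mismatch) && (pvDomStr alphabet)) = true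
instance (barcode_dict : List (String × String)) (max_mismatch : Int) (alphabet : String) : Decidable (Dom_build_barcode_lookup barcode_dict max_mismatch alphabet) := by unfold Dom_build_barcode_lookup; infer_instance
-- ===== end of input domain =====

-- B replaces A's dict with a seen-set plus output list, resolves the exact-match-wins rule
-- eagerly against a precomputed barcode set instead of by dict overwrite, and generates the
-- 1-mismatch variants by one recursive prefix/suffix walk instead of index-and-slice;
-- objective: alternative (same cost, different structure).

-- ===== PORT A =====
def build_barcode_lookup (barcode_dict : List (String × String)) (max_mismatch : Int) (alphabet : String) : List (String × String) :=
  ((PySem.List.dedup (barcode_dict.map Prod.fst)).foldl (fun (lookup : PySem.Dict String String) cb =>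
      let lookup := lookup.insert cb cb
      if max_mismatch ≥ 1 then
        (PySem.List.pyRange 0 (PySem.Str.len cb)).foldl (fun lookup i =>
          let original_base := PySem.List.pyGetD cb.toList i ' '
          alphabet.toList.foldl (fun lookup base =>
            if base == original_base then lookup
            else lookup.setdefault
              (String.ofList (PySem.List.slice cb.toList none (some i) ++ [base] ++
                          PySem.List.slice cb.toList (some (i + 1)) none)) cb) lookup) lookup
      else lookup)
    PySem.Dict.empty).items

-- ===== PORT B =====
-- B helper: all 1-mismatch variants via one prefix/suffix walk (position order, alphabet order)
def altVariants (alpha : List Char) (prefix_ suffix : List Char) : List (List Char) :=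
  match suffix with
  | [] => []
  | orig :: rest =>
      (alpha.filter (fun b => !(b == orig))).map (fun b => prefix_ ++ b :: rest)
      ++ altVariants alpha (prefix_ ++ [orig]) rest

def build_barcode_lookup_alt (barcode_dict : List (String × String)) (max_mismatch : Int) (alphabet : String) : List (String × String) :=
  let barcodes := PySem.List.dedup (barcode_dict.map Prod.fst)
  let exact : PySem.Set String := PySem.Set.ofList barcodes
  (barcodes.foldl (fun (st : PySem.Set String × List (String × String)) cb =>
      let events : List (String × String) := (cb, cb) ::
        (if max_mismatch ≥ 1 then
          (altVariants alphabet.toList [] cb.toList).map (fun m =>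
            let s := String.ofList m
            (s, if PySem.Set.contains exact s then s else cb))
         else [])
      events.foldl (fun st kv =>
        if PySem.Set.contains st.1 kv.1 then st
        else (PySem.Set.add st.1 kv.1, st.2 ++ [kv])) st)
    (PySem.Set.empty, [])).2

-- ===== PRECONDITION & SPEC =====
def Spec_build_barcode_lookup (barcode_dict : List (String × String)) (max_mismatch : Int) (alphabet : String) (out : List (String × String)) : Prop := out = build_barcode_lookup_alt barcode_dict max_mismatch alphabet
instance (barcode_dict : List (String × String)) (max_mismatch : Int) (alphabet : String) (out : List (String × String)) : Decidable (Spec_build_barcode_lookup barcode_dict max_mismatch alphabet out) := by unfold Spec_build_barcode_lookup; infer_instance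

-- ===== CLAIM (what is proved, stated in full; the proofs are below) =====
def Claim_equal_build_barcode_lookup : Prop := ∀ (barcode_dict : List (String × String)) (max_mismatch : Int) (alphabet : String), Dom_build_barcode_lookup barcode_dict max_mismatch alphabet → Spec_build_barcode_lookup barcode_dict max_mismatch alphabet (build_barcode_lookup barcode_dict max_mismatch alphabet)


-- ===== LEMMAS AND PROOFS =====

-- the mutated key at position j, letter b
def pvMutate (cbl : List Char) (j : Nat) (b : Char) : List Char :=
  cbl.take j ++ b :: cbl.drop (j + 1)

-- flat list of the variant keys of one barcode, in generation order
def pvVarKeys (alpha cbl : List Char) : List (List Char) :=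
  (List.range cbl.length).flatMap (fun j =>
    (alpha.filter (fun b => !(b == cbl.getD j ' '))).map (pvMutate cbl j))

def pvVarStrs (alpha cbl : List Char) : List String := (pvVarKeys alpha cbl).map String.ofList

-- value patch: the final value of a key that is itself a barcode is the key
def pvPatch (E : List String) (items : List (String × String)) : List (String × String) :=
  items.map (fun p => (p.1, if p.1 ∈ E then p.1 else p.2))

-- B's seen/out state simulates A's dict
def pvInv (E : List String) (d : PySem.Dict String String) (st : PySem.Set String × List (String × String)) : Prop :=
  st.1 = PySem.Dict.keys d ∧ st.2 = pvPatch E (PySem.Dict.items d) ∧ (PySem.Dict.keys d).Nodup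

-- A's per-barcode step, with the inner double loop flattened
def pvStepA (mm : Int) (alpha : List Char) (d : PySem.Dict String String) (cb : String) : PySem.Dict String String :=
  let d' := d.insert cb cb
  if mm ≥ 1 then (pvVarStrs alpha cb.toList).foldl (fun d m => d.setdefault m cb) d' else d'

def pvEmit (st : PySem.Set String × List (String × String)) (kv : String × String) : PySem.Set String × List (String × String) :=
  if PySem.Set.contains st.1 kv.1 then st else (PySem.Set.add st.1 kv.1, st.2 ++ [kv])

-- B's per-barcode step over the same flat variant list
def pvStepB (E : List String) (mm : Int) (alpha : List Char) (st : PySem.Set String × List (String × String)) (cb : String) : PySem.Set String × List (String × String) :=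
  let st' := pvEmit st (cb, cb)
  if mm ≥ 1 then ((pvVarStrs alpha cb.toList).map (fun s => (s, if s ∈ E then s else cb))).foldl pvEmit st' else st'

-- a loop that skips on p is a loop over the complement filter
theorem pv_foldl_skip {α δ : Type} (p : α → Bool) (f : δ → α → δ) (l : List α) (init : δ) :
    List.foldl (fun acc x => if p x = true then acc else f acc x) init l
      = List.foldl f init (List.filter (fun x => !(p x)) l) := by
  have h : (fun (acc : δ) (x : α) => if p x = true then acc else f acc x)
      = fun acc x => if (!(p x)) = true then f acc x else acc := by
    funext acc x; cases hpx : p x <;> simp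
  rw [h, PySem.List.foldl_if_eq_foldl_filter]

theorem altVariants_eq (alpha : List Char) (suffix : List Char) : ∀ (pref : List Char),
    altVariants alpha pref suffix
      = (List.range suffix.length).flatMap (fun j =>
          (alpha.filter (fun b => !(b == suffix.getD j ' '))).map
            (fun b => pref ++ pvMutate suffix j b)) := by
  induction suffix with
  | nil => intro pref; simp [altVariants]
  | cons orig rest ih =>
      intro pref
      rw [altVariants, ih (pref ++ [orig])]
      simp only [List.length_cons, List.range_succ_eq_map, List.flatMap_cons, List.flatMap_map]
      congr 1
      · simp [pvMutate]

-- A's inner double loop over one barcode is a setdefault-fold over the flat variant-key list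
theorem portA_inner (cb : String) (alphabet : String) (d : PySem.Dict String String) :
    (PySem.List.pyRange 0 (PySem.Str.len cb)).foldl (fun lookup i =>
        let original_base := PySem.List.pyGetD cb.toList i ' '
        alphabet.toList.foldl (fun lookup base =>
          if base == original_base then lookup
          else lookup.setdefault
            (String.ofList (PySem.List.slice cb.toList none (some i) ++ [base] ++
                        PySem.List.slice cb.toList (some (i + 1)) none)) cb) lookup) d
      = (pvVarStrs alphabet.toList cb.toList).foldl (fun d m => d.setdefault m cb) d := by
  rw [PySem.Str.len_eq, PySem.List.pyRange_zero_natCast, List.foldl_map]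
  rw [pvVarStrs, pvVarKeys, List.map_flatMap, List.foldl_flatMap]
  apply PySem.List.foldl_congr_mem
  intro acc j hj
  simp only [List.mem_range] at hj
  simp only [PySem.List.pyGetD_natCast]
  have hcast : (j : Int) + 1 = ((j + 1 : Nat) : Int) := by push_cast; ring
  rw [hcast, PySem.List.slice_to_natCast, PySem.List.slice_from_natCast]
  rw [pv_foldl_skip, List.map_map, List.foldl_map]
  simp [pvMutate, Function.comp]

theorem pvInv_insert (E : List String) (d : PySem.Dict String String)
    (st : PySem.Set String × List (String × String)) (k : String) (hkE : k ∈ E) (h : pvInv E d st) :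
    pvInv E (d.insert k k) (pvEmit st (k, k)) := by
  obtain ⟨h1, h2, h3⟩ := h
  have hc : PySem.Set.contains st.1 k = d.contains k := by
    rw [h1, PySem.Set.contains_eq_decide, PySem.Dict.contains_eq_decide_mem_keys]
  by_cases hk : d.contains k = true
  · rw [pvEmit, hc, hk, if_pos rfl]
    refine ⟨by rw [h1, PySem.Dict.keys_insert_of_contains d k hk], ?_,
      by rw [PySem.Dict.keys_insert_of_contains d k hk]; exact h3⟩
    rw [h2, PySem.Dict.items_insert_of_contains d k hk]
    unfold pvPatch
    rw [List.map_map]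
    apply List.map_congr_left
    intro p _
    by_cases hpk : (p.1 == k) = true
    · have hpk' : p.1 = k := by simpa using hpk
      simp only [Function.comp, hpk']
      simp [hkE]
    · simp [Function.comp, hpk]
  · have hk' : d.contains k = false := by simpa using hk
    have hnm : k ∉ d.keys := by
      rw [PySem.Dict.contains_eq_decide_mem_keys] at hk'; simpa using hk'
    rw [pvEmit, hc, hk', if_neg (by simp)]
    refine ⟨?_, ?_, PySem.Dict.nodup_keys_insert d k k h3⟩
    · rw [PySem.Dict.keys_insert_of_not_contains d k hk', h1, PySem.Set.add_of_not_mem hnm]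
    · rw [PySem.Dict.items_insert_of_not_contains d k hk', h2]
      unfold pvPatch
      simp

theorem pvInv_setdefault (E : List String) (d : PySem.Dict String String)
    (st : PySem.Set String × List (String × String)) (k cb : String) (h : pvInv E d st) :
    pvInv E (d.setdefault k cb) (pvEmit st (k, if k ∈ E then k else cb)) := by
  obtain ⟨h1, h2, h3⟩ := h
  have hc : PySem.Set.contains st.1 k = d.contains k := by
    rw [h1, PySem.Set.contains_eq_decide, PySem.Dict.contains_eq_decide_mem_keys]
  by_cases hk : d.contains k = true
  · rw [pvEmit, hc, hk, if_pos rfl, PySem.Dict.setdefault_of_contains d cb hk]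
    exact ⟨h1, h2, h3⟩
  · have hk' : d.contains k = false := by simpa using hk
    have hnm : k ∉ d.keys := by
      rw [PySem.Dict.contains_eq_decide_mem_keys] at hk'; simpa using hk'
    rw [pvEmit, hc, hk', if_neg (by simp), PySem.Dict.setdefault_of_not_contains d cb hk']
    refine ⟨?_, ?_, PySem.Dict.nodup_keys_insert d k cb h3⟩
    · rw [PySem.Dict.keys_insert_of_not_contains d cb hk', h1, PySem.Set.add_of_not_mem hnm]
    · rw [PySem.Dict.items_insert_of_not_contains d cb hk', h2]
      unfold pvPatch
      simp

theorem pvInv_varfold (E : List String) (cb : String) (ms : List String) :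
    ∀ (d : PySem.Dict String String) (st : PySem.Set String × List (String × String)),
      pvInv E d st →
      pvInv E (ms.foldl (fun d m => d.setdefault m cb) d)
        ((ms.map (fun s => (s, if s ∈ E then s else cb))).foldl pvEmit st) := by
  induction ms with
  | nil => intro d st h; exact h
  | cons m rest ih =>
      intro d st h
      simp only [List.foldl_cons, List.map_cons]
      exact ih _ _ (pvInv_setdefault E d st m cb h)

theorem pvInv_step (E : List String) (mm : Int) (alpha : List Char) (cb : String) (hcb : cb ∈ E)
    (d : PySem.Dict String String) (st : PySem.Set String × List (String × String))
    (h : pvInv E d st) : pvInv E (pvStepA mm alpha d cb) (pvStepB E mm alpha st cb) := by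
  unfold pvStepA pvStepB
  have h1 := pvInv_insert E d st cb hcb h
  by_cases hmm : mm ≥ 1
  · simp only [if_pos hmm]
    exact pvInv_varfold E cb _ _ _ h1
  · simp only [if_neg hmm]
    exact h1

theorem pvInv_outer (E : List String) (mm : Int) (alpha : List Char) (l : List String)
    (hl : ∀ x ∈ l, x ∈ E) :
    ∀ (d : PySem.Dict String String) (st : PySem.Set String × List (String × String)),
      pvInv E d st →
      pvInv E (l.foldl (pvStepA mm alpha) d) (l.foldl (pvStepB E mm alpha) st) := by
  induction l with
  | nil => intro d st h; exact h
  | cons cb rest ih =>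
      intro d st h
      simp only [List.foldl_cons]
      exact ih (fun x hx => hl x (List.mem_cons_of_mem _ hx)) _ _
        (pvInv_step E mm alpha cb (hl cb List.mem_cons_self) d st h)

-- once a key maps to itself it stays mapped to itself
theorem pv_get_self_setdefault (d : PySem.Dict String String) (k v x : String)
    (hx : d.get? x = some x) : (d.setdefault k v).get? x = some x := by
  by_cases hk : d.contains k = true
  · rw [PySem.Dict.setdefault_of_contains d v hk]; exact hx
  · have hk' : d.contains k = false := by simpa using hk
    rw [PySem.Dict.setdefault_of_not_contains d v hk']
    rw [PySem.Dict.get?_insert]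
    have hxk : x ≠ k := by
      intro he
      rw [he] at hx
      rw [PySem.Dict.contains_eq_isSome_get?, hx] at hk'
      simp at hk'
    rw [if_neg hxk]; exact hx

theorem pv_get_self_varfold (cb : String) (ms : List String) :
    ∀ (d : PySem.Dict String String) (x : String), d.get? x = some x →
      (ms.foldl (fun d m => d.setdefault m cb) d).get? x = some x := by
  induction ms with
  | nil => intro d x hx; exact hx
  | cons m rest ih =>
      intro d x hx
      exact ih _ _ (pv_get_self_setdefault d m cb x hx)

theorem pv_get_self_stepA (mm : Int) (alpha : List Char) (d : PySem.Dict String String)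
    (cb x : String) (hx : d.get? x = some x) : (pvStepA mm alpha d cb).get? x = some x := by
  unfold pvStepA
  have hins : (d.insert cb cb).get? x = some x := by
    rw [PySem.Dict.get?_insert]
    by_cases he : x = cb
    · rw [if_pos he, he]
    · rw [if_neg he]; exact hx
  by_cases hmm : mm ≥ 1
  · simp only [if_pos hmm]
    exact pv_get_self_varfold cb _ _ _ hins
  · simp only [if_neg hmm]
    exact hins

theorem pv_get_self_stepA_self (mm : Int) (alpha : List Char) (d : PySem.Dict String String)
    (cb : String) : (pvStepA mm alpha d cb).get? cb = some cb := by
  unfold pvStepA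
  have hins : (d.insert cb cb).get? cb = some cb := PySem.Dict.get?_insert_self d cb cb
  by_cases hmm : mm ≥ 1
  · simp only [if_pos hmm]
    exact pv_get_self_varfold cb _ _ _ hins
  · simp only [if_neg hmm]
    exact hins

theorem pv_get_self_fold (mm : Int) (alpha : List Char) (l : List String) :
    ∀ (d : PySem.Dict String String) (x : String),
      (x ∈ l ∨ d.get? x = some x) → (l.foldl (pvStepA mm alpha) d).get? x = some x := by
  induction l with
  | nil =>
      intro d x hx
      cases hx with
      | inl h => cases h
      | inr h => exact h
  | cons cb rest ih =>
      intro d x hx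
      simp only [List.foldl_cons]
      rcases hx with hx | hx
      · rcases List.mem_cons.mp hx with he | hm
        · subst he
          exact ih _ _ (Or.inr (pv_get_self_stepA_self mm alpha d x))
        · exact ih _ _ (Or.inl hm)
      · exact ih _ _ (Or.inr (pv_get_self_stepA mm alpha d cb x hx))

theorem pvInv_init (E : List String) : pvInv E PySem.Dict.empty (PySem.Set.empty, []) := by
  refine ⟨?_, ?_, ?_⟩ <;> simp [PySem.Set.empty, pvPatch, PySem.Dict.empty, PySem.Dict.keys]

-- the final dict already satisfies the patch: every barcode key maps to itself
theorem pvPatch_final (E : List String) (mm : Int) (alpha : List Char) :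
    pvPatch E ((E.foldl (pvStepA mm alpha) PySem.Dict.empty).items)
      = (E.foldl (pvStepA mm alpha) PySem.Dict.empty).items := by
  have hnd : (E.foldl (pvStepA mm alpha) PySem.Dict.empty).keys.Nodup :=
    (pvInv_outer E mm alpha E (fun _ hx => hx) _ _ (pvInv_init E)).2.2
  unfold pvPatch
  have hent : ∀ p ∈ (E.foldl (pvStepA mm alpha) PySem.Dict.empty).items,
      (fun (p : String × String) => (p.1, if p.1 ∈ E then p.1 else p.2)) p = id p := by
    intro p hp
    obtain ⟨a, b⟩ := p
    by_cases hpE : a ∈ E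
    · have hz : (E.foldl (pvStepA mm alpha) PySem.Dict.empty).get? a = some a :=
        pv_get_self_fold mm alpha E _ _ (Or.inl hpE)
      have hv : (E.foldl (pvStepA mm alpha) PySem.Dict.empty).get? a = some b :=
        PySem.Dict.get?_of_mem_items _ hp hnd
      have hab : a = b := by
        have := hz.symm.trans hv
        simpa using this
      simp [hab]
    · simp [hpE]
  rw [List.map_congr_left hent, List.map_id]

-- ===== VERDICT (by name: the statement is the Claim_ definition above) =====
theorem build_barcode_lookup_spec : Claim_equal_build_barcode_lookup := by
  intro bd mm alpha _
  show ((PySem.List.dedup (bd.map Prod.fst)).foldl (fun (lookup : PySem.Dict String String) cb =>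
      if mm ≥ 1 then
        (PySem.List.pyRange 0 (PySem.Str.len cb)).foldl (fun lookup i =>
          alpha.toList.foldl (fun lookup base =>
            if base == PySem.List.pyGetD cb.toList i ' ' then lookup
            else lookup.setdefault
              (String.ofList (PySem.List.slice cb.toList none (some i) ++ [base] ++
                PySem.List.slice cb.toList (some (i + 1)) none)) cb) lookup) (lookup.insert cb cb)
      else lookup.insert cb cb) PySem.Dict.empty).items
    = ((PySem.List.dedup (bd.map Prod.fst)).foldl
        (fun (st : PySem.Set String × List (String × String)) cb =>
          (((cb, cb) :: (if mm ≥ 1 then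
              (altVariants alpha.toList [] cb.toList).map (fun m =>
                (String.ofList m,
                 if PySem.Set.contains (PySem.Set.ofList (PySem.List.dedup (bd.map Prod.fst))) (String.ofList m)
                 then String.ofList m else cb))
             else [])).foldl (fun st kv =>
              if PySem.Set.contains st.1 kv.1 then st
              else (PySem.Set.add st.1 kv.1, st.2 ++ [kv])) st))
        (PySem.Set.empty, [])).2
  generalize PySem.List.dedup (bd.map Prod.fst) = E
  have hA : ∀ (lookup : PySem.Dict String String), ∀ cb ∈ E,
      (if mm ≥ 1 then
        (PySem.List.pyRange 0 (PySem.Str.len cb)).foldl (fun lookup i =>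
          alpha.toList.foldl (fun lookup base =>
            if base == PySem.List.pyGetD cb.toList i ' ' then lookup
            else lookup.setdefault
              (String.ofList (PySem.List.slice cb.toList none (some i) ++ [base] ++
                PySem.List.slice cb.toList (some (i + 1)) none)) cb) lookup) (lookup.insert cb cb)
      else lookup.insert cb cb) = pvStepA mm alpha.toList lookup cb := by
    intro d cb _
    unfold pvStepA
    by_cases hmm : mm ≥ 1
    · simp only [if_pos hmm]
      exact portA_inner cb alpha (d.insert cb cb)
    · simp only [if_neg hmm]
  have hAeq := PySem.List.foldl_congr_mem E _ _ PySem.Dict.empty hA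
  rw [hAeq]
  have hmap : ∀ cb : String,
      (altVariants alpha.toList [] cb.toList).map (fun m =>
          (String.ofList m,
           if PySem.Set.contains (PySem.Set.ofList E) (String.ofList m)
           then String.ofList m else cb))
        = (pvVarStrs alpha.toList cb.toList).map (fun s => (s, if s ∈ E then s else cb)) := by
    intro cb
    rw [altVariants_eq]
    simp only [List.nil_append]
    rw [show ((List.range cb.toList.length).flatMap (fun j =>
        (alpha.toList.filter (fun b => !(b == cb.toList.getD j ' '))).map (pvMutate cb.toList j)))
      = pvVarKeys alpha.toList cb.toList from rfl]
    rw [pvVarStrs, List.map_map]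
    apply List.map_congr_left
    intro m _
    simp only [Function.comp]
    congr 1
    rw [PySem.Set.contains_eq_decide]
    by_cases hm : String.ofList m ∈ E
    · rw [if_pos hm, if_pos (by simp [PySem.Set.mem_ofList, hm])]
    · rw [if_neg hm, if_neg (by simp [PySem.Set.mem_ofList, hm])]
  have hB : ∀ (st : PySem.Set String × List (String × String)), ∀ cb ∈ E,
      (((cb, cb) :: (if mm ≥ 1 then
          (altVariants alpha.toList [] cb.toList).map (fun m =>
            (String.ofList m,
             if PySem.Set.contains (PySem.Set.ofList E) (String.ofList m)
             then String.ofList m else cb))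
         else [])).foldl (fun st kv =>
          if PySem.Set.contains st.1 kv.1 then st
          else (PySem.Set.add st.1 kv.1, st.2 ++ [kv])) st)
      = pvStepB E mm alpha.toList st cb := by
    intro st cb _
    rw [List.foldl_cons, hmap cb]
    unfold pvStepB
    by_cases hmm : mm ≥ 1
    · simp only [if_pos hmm]
      rfl
    · simp only [if_neg hmm]
      rfl
  rw [PySem.List.foldl_congr_mem E _ _ (PySem.Set.empty, []) hB]
  have hinv := pvInv_outer E mm alpha.toList E (fun _ hx => hx) _ _ (pvInv_init E)
  rw [hinv.2.1, pvPatch_final]
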